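-- pv_equiv track=rewrite | github.com/SBNSoftware/sbnana | sbnana/SBNAna/pyana/pyanalib/panda_helpers.py | detect_vectors
-- ===== SOURCE A (Python) =====
-- def detect_vectors(tree, branch):
--     ret = []
--     hierarchy = branch.split(".")
--     for i in range(len(hierarchy)):
--         subbranch = ".".join(hierarchy[:i+1])
--         lenbranch = subbranch + "..length"
--         if lenbranch in tree.keys():
--             ret.append(subbranch)
--     return ret
-- ===== SOURCE B (Python) =====
-- def detect_vectors(tree, branch):
--     hierarchy = branch.split(".")
--     prefixes = {".".join(hierarchy[:i+1]) for i in range(len(hierarchy))}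
--     found = [k[:-8] for k in tree.keys() if k.endswith("..length") and k[:-8] in prefixes]
--     found.sort(key=len)
--     return found
-- ===== Notes on version B (the rewrite author's own statement) =====
-- stated objective: alternative
-- what changed: B inverts the traversal: instead of testing each hierarchy prefix against the dict, it builds the prefix set once, makes a single pass over tree.keys() keeping keys with the '..length' suffix whose stripped prefix is in the set, and restores increasing-depth order with a sort by length.
import Mathlib
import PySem

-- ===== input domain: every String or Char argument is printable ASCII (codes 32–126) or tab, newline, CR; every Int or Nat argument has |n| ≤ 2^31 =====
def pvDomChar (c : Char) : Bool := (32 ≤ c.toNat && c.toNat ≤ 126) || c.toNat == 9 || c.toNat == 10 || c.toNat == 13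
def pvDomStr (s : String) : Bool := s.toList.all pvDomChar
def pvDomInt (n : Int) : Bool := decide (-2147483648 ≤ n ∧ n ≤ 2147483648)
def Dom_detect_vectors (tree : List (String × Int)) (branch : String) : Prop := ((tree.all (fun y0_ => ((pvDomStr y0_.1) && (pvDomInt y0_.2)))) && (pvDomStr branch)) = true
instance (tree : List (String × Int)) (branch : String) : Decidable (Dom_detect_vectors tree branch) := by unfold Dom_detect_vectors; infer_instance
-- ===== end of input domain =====

-- B replaces A's per-prefix dict lookups by one pass over the keys of `tree` plus a sort by
-- length restoring the increasing-depth order; an alternative decomposition, not claimed faster.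

-- ===== PORT A =====
-- `branch.split(".")`: sep "." ≠ "" so split? is always `some`; getD's default is never used
def detect_vectors (tree : List (String × Int)) (branch : String) : List String :=
  let hierarchy := (PySem.Str.split? branch ".").getD []
  (PySem.List.pyRange 0 (hierarchy.length : Int) 1).foldl (fun ret i =>
    let subbranch := PySem.Str.join "." (PySem.List.slice hierarchy none (some (i+1)))
    let lenbranch := subbranch ++ "..length"
    if lenbranch ∈ tree.map Prod.fst then ret ++ [subbranch] else ret) []

-- ===== PORT B =====
-- `tree.keys()` iterated: a Python dict's keys are the assoc list's keys, first occurrences, in order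
def detect_vectors_alt (tree : List (String × Int)) (branch : String) : List String :=
  let hierarchy := (PySem.Str.split? branch ".").getD []
  let prefixes : PySem.Set String := PySem.Set.ofList ((PySem.List.pyRange 0 (hierarchy.length : Int) 1).map
    (fun i => PySem.Str.join "." (PySem.List.slice hierarchy none (some (i+1)))))
  let found := ((PySem.List.dedup (tree.map Prod.fst)).filter
      (fun k => PySem.Str.endswith k "..length" && PySem.Set.contains prefixes (PySem.Str.slice k none (some (-8))))).map
    (fun k => PySem.Str.slice k none (some (-8)))
  PySem.List.sorted found (fun p => PySem.Str.len p) false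

-- ===== PRECONDITION & SPEC =====
def Spec_detect_vectors (tree : List (String × Int)) (branch : String) (out : List String) : Prop := out = detect_vectors_alt tree branch
instance (tree : List (String × Int)) (branch : String) (out : List String) : Decidable (Spec_detect_vectors tree branch out) := by unfold Spec_detect_vectors; infer_instance

-- ===== CLAIM (what is proved, stated in full; the proofs are below) =====
def Claim_equal_detect_vectors : Prop := ∀ (tree : List (String × Int)) (branch : String), Dom_detect_vectors tree branch → Spec_detect_vectors tree branch (detect_vectors tree branch)

-- ===== LEMMAS AND PROOFS =====

-- the i-th subbranch, as a function of the (arbitrary) hierarchy list and the prefix length m = i+1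
def pvPrefix (h : List String) (m : Nat) : String := PySem.Str.join "." (h.take m)

-- join over l ++ [a] appends "sep ++ a" when l ≠ []
theorem pvJoin_append_singleton (sep a : List Char) (l : List (List Char)) (hl : l ≠ []) :
    PySem.Chars.join sep (l ++ [a]) = PySem.Chars.join sep l ++ sep ++ a := by
  induction l with
  | nil => exact absurd rfl hl
  | cons x t ih =>
    cases t with
    | nil => simp [PySem.Chars.join_cons_cons, PySem.Chars.join_singleton]
    | cons y r =>
      have := ih (by simp)
      simp only [List.cons_append, PySem.Chars.join_cons_cons] at this ⊢
      simp [this]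

-- lengths of successive prefixes strictly increase (for 1 ≤ m)
theorem pvPrefix_len_succ (h : List String) (m : Nat) (h1 : 1 ≤ m) (h2 : m < h.length) :
    (pvPrefix h m).toList.length < (pvPrefix h (m+1)).toList.length := by
  have ht : h.take (m+1) = h.take m ++ [h[m]] := by
    rw [List.take_add_one]; simp [List.getElem?_eq_getElem h2]
  have hne : (h.take m).map String.toList ≠ [] := by
    simp only [ne_eq, List.map_eq_nil_iff, List.take_eq_nil_iff, not_or]
    constructor
    · omega
    · intro hh; subst hh; simp at h2
  unfold pvPrefix
  rw [PySem.Str.toList_join, PySem.Str.toList_join, ht, List.map_append, List.map_singleton,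
    pvJoin_append_singleton _ _ _ hne]
  simp

theorem pvPrefix_len_mono (h : List String) (k k' : Nat) (h1 : 1 ≤ k) (hlt : k < k') (h2 : k' ≤ h.length) :
    (pvPrefix h k).toList.length < (pvPrefix h k').toList.length := by
  induction k' with
  | zero => omega
  | succ m ih =>
    rcases Nat.lt_or_ge k m with hc | hc
    · exact lt_trans (ih hc (by omega)) (pvPrefix_len_succ h m (by omega) (by omega))
    · have : k = m := by omega
      subst this
      exact pvPrefix_len_succ h k h1 (by omega)

-- A's loop, in closed form over the index range
theorem pvA_closed (tree : List (String × Int)) (branch : String) :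
    detect_vectors tree branch =
      (((List.range ((PySem.Str.split? branch ".").getD []).length).filter
          (fun k => decide (pvPrefix ((PySem.Str.split? branch ".").getD []) (k+1) ++ "..length" ∈ tree.map Prod.fst))).map
        (fun k => pvPrefix ((PySem.Str.split? branch ".").getD []) (k+1))) := by
  unfold detect_vectors
  simp only []
  set h : List String := (PySem.Str.split? branch ".").getD [] with hh
  rw [PySem.List.pyRange_of_pos _ _ (by norm_num : (0:Int) < 1)]
  have hn : (if (0:Int) < (h.length:Int) then (((h.length:Int) - 0 + 1 - 1)/1).toNat else 0) = h.length := by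
    split_ifs <;> omega
  rw [hn, List.foldl_map]
  have hf : (fun (ret : List String) (k : Nat) =>
      if PySem.Str.join "." (PySem.List.slice h none (some ((0:Int) + 1 * (k:Nat) + 1))) ++ "..length" ∈ tree.map Prod.fst
      then ret ++ [PySem.Str.join "." (PySem.List.slice h none (some ((0:Int) + 1 * (k:Nat) + 1)))] else ret)
      = (fun (ret : List String) (k : Nat) =>
      if pvPrefix h (k+1) ++ "..length" ∈ tree.map Prod.fst then ret ++ [pvPrefix h (k+1)] else ret) := by
    funext ret k
    have hb : ((0:Int) + 1 * (k:Nat) + 1) = (((k+1 : Nat)):Int) := by push_cast; ring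
    rw [hb, PySem.List.slice_to_natCast]
    rfl
  rw [hf, PySem.List.foldl_append_ite (fun k => pvPrefix h (k+1) ++ "..length" ∈ tree.map Prod.fst)
    (fun k => pvPrefix h (k+1))]
  simp

-- B's pre-sort list membership / nodup facts and the final equality
theorem pvStrip_append (x : String) :
    PySem.Str.slice (x ++ "..length") none (some (-8)) = x := by
  apply String.toList_injective
  rw [PySem.Str.toList_slice, PySem.Chars.slice_eq_listSlice, String.toList_append,
    PySem.List.slice_to_neg_ofNat _ 8 (by norm_num)]
  simp

theorem pvEnds_strip (k : String) (he : PySem.Str.endswith k "..length" = true) :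
    (PySem.Str.slice k none (some (-8))) ++ "..length" = k := by
  rw [PySem.Str.endswith_eq, PySem.Chars.endswith_iff] at he
  obtain ⟨pre, hpre⟩ := he
  apply String.toList_injective
  rw [String.toList_append, PySem.Str.toList_slice, PySem.Chars.slice_eq_listSlice,
    PySem.List.slice_to_neg_ofNat _ 8 (by norm_num), ← hpre]
  simp

-- B's prefix list, in the same closed form
theorem pvP_closed (h : List String) :
    (PySem.List.pyRange 0 (h.length : Int) 1).map
      (fun i => PySem.Str.join "." (PySem.List.slice h none (some (i+1))))
    = (List.range h.length).map (fun k => pvPrefix h (k+1)) := by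
  rw [PySem.List.pyRange_of_pos _ _ (by norm_num : (0:Int) < 1)]
  have hn : (if (0:Int) < (h.length:Int) then (((h.length:Int) - 0 + 1 - 1)/1).toNat else 0) = h.length := by
    split_ifs <;> omega
  rw [hn, List.map_map]
  apply List.map_congr_left
  intro k _
  have hb : ((0:Int) + 1 * (k:Nat) + 1) = (((k+1 : Nat)):Int) := by push_cast; ring
  simp only [Function.comp, hb, PySem.List.slice_to_natCast]
  rfl

theorem pvPrefix_ne (h : List String) (k k' : Nat) (hk : k < h.length) (hk' : k' < h.length)
    (hne : k ≠ k') : pvPrefix h (k+1) ≠ pvPrefix h (k'+1) := by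
  intro he
  rcases Nat.lt_or_ge k k' with hlt | hge
  · have := pvPrefix_len_mono h (k+1) (k'+1) (by omega) (by omega) (by omega)
    rw [he] at this; omega
  · have hlt : k' < k := by omega
    have := pvPrefix_len_mono h (k'+1) (k+1) (by omega) (by omega) (by omega)
    rw [he] at this; omega

theorem detect_vectors_spec' (tree : List (String × Int)) (branch : String) :
    detect_vectors tree branch = detect_vectors_alt tree branch := by
  rw [pvA_closed]
  unfold detect_vectors_alt
  simp only []
  set h : List String := (PySem.Str.split? branch ".").getD [] with hh
  rw [pvP_closed]
  set n := h.length with hn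
  set km := tree.map Prod.fst with hkm
  set suf : String := "..length" with hsuf
  set P : List String := (List.range n).map (fun k => pvPrefix h (k+1)) with hP
  set strip : String → String := fun k => PySem.Str.slice k none (some (-8)) with hstrip
  set AL : List String := ((List.range n).filter
    (fun k => decide (pvPrefix h (k+1) ++ suf ∈ km))).map (fun k => pvPrefix h (k+1)) with hAL
  set found : List String := ((PySem.List.dedup km).filter
    (fun k => PySem.Str.endswith k suf && PySem.Set.contains (PySem.Set.ofList P) (strip k))).map strip with hfound
  -- membership characterisations
  have memAL : ∀ x, x ∈ AL ↔ (x ∈ P ∧ x ++ suf ∈ km) := by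
    intro x
    rw [hAL, hP]
    simp only [List.mem_map, List.mem_filter, List.mem_range, decide_eq_true_eq]
    constructor
    · rintro ⟨k, ⟨hk, hmem⟩, rfl⟩
      exact ⟨⟨k, hk, rfl⟩, hmem⟩
    · rintro ⟨⟨k, hk, rfl⟩, hmem⟩
      exact ⟨k, ⟨hk, hmem⟩, rfl⟩
  have memfound : ∀ x, x ∈ found ↔ (x ∈ P ∧ x ++ suf ∈ km) := by
    intro x
    rw [hfound]
    simp only [List.mem_map, List.mem_filter, PySem.List.mem_dedup, Bool.and_eq_true,
      PySem.Set.contains_iff, PySem.Set.mem_ofList]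
    constructor
    · rintro ⟨k, ⟨hkm', he, hP'⟩, rfl⟩
      refine ⟨hP', ?_⟩
      rw [hstrip]
      rw [pvEnds_strip k he]
      exact hkm'
    · rintro ⟨hP', hmem⟩
      refine ⟨x ++ suf, ⟨hmem, ?_, ?_⟩, ?_⟩
      · rw [hsuf, PySem.Str.endswith_eq, PySem.Chars.endswith_iff, String.toList_append]
        exact List.suffix_append _ _
      · rw [hstrip]; simp only []; rw [hsuf, pvStrip_append]; exact hP'
      · rw [hstrip]; simp only []; rw [hsuf, pvStrip_append]
  -- nodup on both sides
  have ALnodup : AL.Nodup := by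
    rw [hAL]
    apply List.Nodup.map_on
    · intro a ha b hb hab
      have ha' : a < n := List.mem_range.mp (List.mem_of_mem_filter ha)
      have hb' : b < n := List.mem_range.mp (List.mem_of_mem_filter hb)
      by_contra hne
      exact pvPrefix_ne h a b ha' hb' hne hab
    · exact (List.nodup_range).filter _
  have foundNodup : found.Nodup := by
    rw [hfound]
    apply List.Nodup.map_on
    · intro a ha b hb hab
      have ha' := (List.mem_filter.mp ha).2
      have hb' := (List.mem_filter.mp hb).2
      rw [Bool.and_eq_true] at ha' hb'
      have hea := ha'.1
      have heb := hb'.1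
      rw [← pvEnds_strip a hea, ← pvEnds_strip b heb]
      rw [hstrip] at hab
      simp only [] at hab
      rw [hab]
    · exact (PySem.List.nodup_dedup km).filter _
  -- A's list is a permutation of B's pre-sort list
  have hperm : AL.Perm found :=
    (List.perm_ext_iff_of_nodup ALnodup foundNodup).mpr
      (fun x => by rw [memAL x, memfound x])
  -- A's list is strictly increasing under the sort key
  have hpair : AL.Pairwise (fun a b => PySem.Str.len a < PySem.Str.len b) := by
    rw [hAL, List.pairwise_map]
    have h1 : (List.range n).Pairwise (fun a b => a < b ∧ a < n ∧ b < n) := by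
      rw [List.pairwise_iff_getElem]
      intro i j hi hj hij
      simp only [List.length_range] at hi hj
      simp only [List.getElem_range]
      omega
    have h2 := h1.filter (fun k => decide (pvPrefix h (k+1) ++ suf ∈ km))
    apply h2.imp
    rintro a b ⟨hab, ha, hb⟩
    have := pvPrefix_len_mono h (a+1) (b+1) (by omega) (by omega) (by omega)
    rw [PySem.Str.len_eq, PySem.Str.len_eq]
    exact_mod_cast this
  exact (PySem.List.sorted_eq_of_perm_of_pairwise_lt found AL (fun p => PySem.Str.len p) hperm hpair).symm

-- ===== VERDICT (by name: the statement is the Claim_ definition above) =====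
theorem detect_vectors_spec : Claim_equal_detect_vectors := by
  intro tree branch _
  unfold Spec_detect_vectors
  exact detect_vectors_spec' tree branch
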